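-- pv_equiv track=rewrite | github.com/wilmurillo-ai/Design-Assistant | .skills/openclaw-skills/skills/sxy799/highway-lifecycle/scripts/road_damage_detector.py | check_model_confusion_pattern
-- ===== SOURCE A (Python) =====
-- from typing import Dict, List, Optional
--
-- def check_model_confusion_pattern(predictions: List[Dict]) -> Dict:
--     """检测模型混淆模式"""
--     patterns = {
--         "横纵混淆": 0,  # 横向判断为纵向或反之
--         "病害修补混淆": 0,  # 坑槽判断为修补或反之
--         "裂缝遗漏": 0,  # 存在裂缝但未检测
--     }
--
--     for pred in predictions:
--         pred_type = pred.get("predicted", "")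
--         true_type = pred.get("ground_truth", "")
--
--         # 横纵裂缝混淆
--         if (pred_type in ("D00", "D10") and true_type in ("D00", "D10") and pred_type != true_type):
--             patterns["横纵混淆"] += 1
--
--         # 坑槽与修补混淆
--         if (pred_type in ("D40", "REPAIR") and true_type in ("D40", "REPAIR") and pred_type != true_type):
--             patterns["病害修补混淆"] += 1
--
--     return patterns
-- ===== SOURCE B (Python) =====
-- from typing import Dict, List, Optional
--
-- def check_model_confusion_pattern(predictions: List[Dict]) -> Dict:
--     """检测模型混淆模式: stage 1 projects each prediction to its (predicted, ground_truth)
--     pair; stage 2 builds the result by counting the four confusion pairs directly."""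
--     pairs = [(p.get("predicted", ""), p.get("ground_truth", "")) for p in predictions]
--     return {
--         "横纵混淆": pairs.count(("D00", "D10")) + pairs.count(("D10", "D00")),
--         "病害修补混淆": pairs.count(("D40", "REPAIR")) + pairs.count(("REPAIR", "D40")),
--         "裂缝遗漏": 0,
--     }
-- ===== Notes on version B (the rewrite author's own statement) =====
-- stated objective: idiomatic
-- what changed: A keeps a mutable counter dict and increments it inside one loop with two compound membership-and-inequality branches per element; B is branch-free: it first projects the list to (predicted, ground_truth) pairs, then builds the result dict in one expression from list.count of the four exact confusion pairs.
import Mathlib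
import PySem

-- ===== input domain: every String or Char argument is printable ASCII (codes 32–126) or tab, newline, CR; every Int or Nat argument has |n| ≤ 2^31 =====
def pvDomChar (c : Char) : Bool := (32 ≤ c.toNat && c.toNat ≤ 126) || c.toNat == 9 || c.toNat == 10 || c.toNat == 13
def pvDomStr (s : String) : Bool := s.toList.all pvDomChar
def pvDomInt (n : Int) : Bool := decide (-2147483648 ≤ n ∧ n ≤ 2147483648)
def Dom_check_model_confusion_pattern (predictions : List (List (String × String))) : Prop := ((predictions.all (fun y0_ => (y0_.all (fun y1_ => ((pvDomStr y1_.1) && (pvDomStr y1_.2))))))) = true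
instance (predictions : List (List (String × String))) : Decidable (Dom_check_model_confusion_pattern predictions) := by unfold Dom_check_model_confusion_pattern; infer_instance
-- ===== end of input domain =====

-- B changes the decomposition: A's single loop mutating a counter dict through two compound
-- branches becomes project-to-(predicted,ground_truth)-pairs then count the four confusion pairs.

-- shared helper: Python's pred.get(k, dflt) on an association-list dict (first match)
def pvGetKey (pred : List (String × String)) (k dflt : String) : String :=
  match pred.find? (fun p => p.1 == k) with
  | some p => p.2
  | none => dflt

-- ===== PORT A =====
-- loop body of A (one iteration: read the two fields, apply the two conditional increments)
def pvStepA (patterns : PySem.Dict String Int) (pred : List (String × String)) : PySem.Dict String Int :=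
  let pred_type := pvGetKey pred "predicted" ""
  let true_type := pvGetKey pred "ground_truth" ""
  let patterns :=
    if (pred_type = "D00" ∨ pred_type = "D10") ∧ (true_type = "D00" ∨ true_type = "D10") ∧ pred_type ≠ true_type then
      patterns.modify "横纵混淆" 0 (· + 1)
    else patterns
  if (pred_type = "D40" ∨ pred_type = "REPAIR") ∧ (true_type = "D40" ∨ true_type = "REPAIR") ∧ pred_type ≠ true_type then
    patterns.modify "病害修补混淆" 0 (· + 1)
  else patterns

def check_model_confusion_pattern (predictions : List (List (String × String))) : List (String × Int) :=
  let patterns : PySem.Dict String Int :=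
    PySem.Dict.mk [("横纵混淆", 0), ("病害修补混淆", 0), ("裂缝遗漏", 0)]
  (predictions.foldl pvStepA patterns).items

-- ===== PORT B =====
def check_model_confusion_pattern_alt (predictions : List (List (String × String))) : List (String × Int) :=
  let pairs := predictions.map (fun p => (pvGetKey p "predicted" "", pvGetKey p "ground_truth" ""))
  [("横纵混淆", (pairs.count ("D00", "D10") : Int) + (pairs.count ("D10", "D00") : Int)),
   ("病害修补混淆", (pairs.count ("D40", "REPAIR") : Int) + (pairs.count ("REPAIR", "D40") : Int)),
   ("裂缝遗漏", 0)]

-- ===== PRECONDITION & SPEC =====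
def Spec_check_model_confusion_pattern (predictions : List (List (String × String))) (out : List (String × Int)) : Prop := out = check_model_confusion_pattern_alt predictions
instance (predictions : List (List (String × String))) (out : List (String × Int)) : Decidable (Spec_check_model_confusion_pattern predictions out) := by unfold Spec_check_model_confusion_pattern; infer_instance

-- ===== CLAIM =====
def Claim_equal_check_model_confusion_pattern : Prop := ∀ (predictions : List (List (String × String))), Dom_check_model_confusion_pattern predictions → Spec_check_model_confusion_pattern predictions (check_model_confusion_pattern predictions)

-- ===== LEMMAS AND PROOFS =====

-- A's first branch condition fires exactly on the two pairs B counts for 横纵混淆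
theorem pv_cond1 (pt tt : String) :
    ((pt = "D00" ∨ pt = "D10") ∧ (tt = "D00" ∨ tt = "D10") ∧ pt ≠ tt)
      ↔ ((pt, tt) = ("D00", "D10") ∨ (pt, tt) = ("D10", "D00")) := by
  constructor
  · rintro ⟨(rfl | rfl), (rfl | rfl), hne⟩ <;> simp_all
  · rintro (h | h) <;> (rw [Prod.mk.injEq] at h; obtain ⟨rfl, rfl⟩ := h) <;> simp_all

-- A's second branch condition fires exactly on the two pairs B counts for 病害修补混淆
theorem pv_cond2 (pt tt : String) :
    ((pt = "D40" ∨ pt = "REPAIR") ∧ (tt = "D40" ∨ tt = "REPAIR") ∧ pt ≠ tt)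
      ↔ ((pt, tt) = ("D40", "REPAIR") ∨ ((pt, tt) = ("REPAIR", "D40"))) := by
  constructor
  · rintro ⟨(rfl | rfl), (rfl | rfl), hne⟩ <;> simp_all
  · rintro (h | h) <;> (rw [Prod.mk.injEq] at h; obtain ⟨rfl, rfl⟩ := h) <;> simp_all

-- one iteration of A on the three-key state, as two 0/1 increments
theorem pv_step_eq (a b : Int) (p : List (String × String)) :
    pvStepA (PySem.Dict.mk [("横纵混淆", a), ("病害修补混淆", b), ("裂缝遗漏", 0)]) p
      = PySem.Dict.mk
          [("横纵混淆", a + (if (pvGetKey p "predicted" "", pvGetKey p "ground_truth" "") = ("D00", "D10") then 1 else 0)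
                        + (if (pvGetKey p "predicted" "", pvGetKey p "ground_truth" "") = ("D10", "D00") then 1 else 0)),
           ("病害修补混淆", b + (if (pvGetKey p "predicted" "", pvGetKey p "ground_truth" "") = ("D40", "REPAIR") then 1 else 0)
                          + (if (pvGetKey p "predicted" "", pvGetKey p "ground_truth" "") = ("REPAIR", "D40") then 1 else 0)),
           ("裂缝遗漏", 0)] := by
  simp only [pvStepA, pv_cond1, pv_cond2]
  by_cases hA : (pvGetKey p "predicted" "", pvGetKey p "ground_truth" "") = ("D00", "D10") <;>
    by_cases hB : (pvGetKey p "predicted" "", pvGetKey p "ground_truth" "") = ("D10", "D00") <;>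
      by_cases hC : (pvGetKey p "predicted" "", pvGetKey p "ground_truth" "") = ("D40", "REPAIR") <;>
        by_cases hD : (pvGetKey p "predicted" "", pvGetKey p "ground_truth" "") = ("REPAIR", "D40") <;>
    first
    | exact absurd (hA.symm.trans hB) (by decide)
    | exact absurd (hA.symm.trans hC) (by decide)
    | exact absurd (hA.symm.trans hD) (by decide)
    | exact absurd (hB.symm.trans hC) (by decide)
    | exact absurd (hB.symm.trans hD) (by decide)
    | exact absurd (hC.symm.trans hD) (by decide)
    | simp [hA, hB, hC, hD, PySem.Dict.modify, PySem.Dict.insert, PySem.Dict.getD, PySem.Dict.get?, PySem.Dict.contains]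

-- loop invariant: the fold from any (a, b) state adds the pair counts of the suffix
theorem pv_fold (ps : List (List (String × String))) : ∀ (a b : Int),
    (ps.foldl pvStepA (PySem.Dict.mk [("横纵混淆", a), ("病害修补混淆", b), ("裂缝遗漏", 0)])).items
    = (let pairs := ps.map (fun p => (pvGetKey p "predicted" "", pvGetKey p "ground_truth" ""))
       [("横纵混淆", a + (pairs.count ("D00", "D10") : Int) + (pairs.count ("D10", "D00") : Int)),
        ("病害修补混淆", b + (pairs.count ("D40", "REPAIR") : Int) + (pairs.count ("REPAIR", "D40") : Int)),
        ("裂缝遗漏", 0)]) := by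
  induction ps with
  | nil => intro a b; simp
  | cons p ps ih =>
    intro a b
    rw [List.foldl_cons, pv_step_eq, ih]
    simp only [List.map_cons, List.count_cons]
    by_cases hA : (pvGetKey p "predicted" "", pvGetKey p "ground_truth" "") = ("D00", "D10") <;>
      by_cases hB : (pvGetKey p "predicted" "", pvGetKey p "ground_truth" "") = ("D10", "D00") <;>
        by_cases hC : (pvGetKey p "predicted" "", pvGetKey p "ground_truth" "") = ("D40", "REPAIR") <;>
          by_cases hD : (pvGetKey p "predicted" "", pvGetKey p "ground_truth" "") = ("REPAIR", "D40") <;>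
    first
    | exact absurd (hA.symm.trans hB) (by decide)
    | exact absurd (hA.symm.trans hC) (by decide)
    | exact absurd (hA.symm.trans hD) (by decide)
    | exact absurd (hB.symm.trans hC) (by decide)
    | exact absurd (hB.symm.trans hD) (by decide)
    | exact absurd (hC.symm.trans hD) (by decide)
    | (simp [hA, hB, hC, hD]; try ring_nf; try rfl)

-- ===== VERDICT =====
theorem check_model_confusion_pattern_spec : Claim_equal_check_model_confusion_pattern := by
  intro predictions _
  unfold Spec_check_model_confusion_pattern check_model_confusion_pattern check_model_confusion_pattern_alt
  rw [pv_fold]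
  simp
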